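-- pv_equiv track=rewrite | github.com/caiusy/caiusy.github.io | remove_empty_code_blocks.py | remove_empty_code_blocks
-- ===== SOURCE A (Python) =====
-- def remove_empty_code_blocks(content):
--     """删除只有行号或完全为空的代码块"""
--     lines = content.split('\n')
--     result = []
--     in_code_block = False
--     code_start_idx = -1
--     code_lang = ""
--     code_block_lines = []
--
--     for i, line in enumerate(lines):
--         # 检测代码块开始
--         if line.strip().startswith('```'):
--             if not in_code_block:
--                 # 代码块开始
--                 in_code_block = True
--                 code_start_idx = len(result)
--                 code_lang = line.strip()[3:].strip()
--                 result.append(line)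
--                 code_block_lines = []
--             else:
--                 # 代码块结束，检查内容
--                 # 判断是否是空代码块或只有行号的代码块
--                 non_empty_lines = [l for l in code_block_lines if l.strip()]
--
--                 # 检查是否只包含数字（行号）
--                 is_only_numbers = True
--                 if non_empty_lines:
--                     for l in non_empty_lines:
--                         # 如果不是纯数字，则不是"只有行号"的代码块
--                         if not l.strip().isdigit():
--                             is_only_numbers = False
--                             break
--                 else:
--                     # 完全空的代码块
--                     is_only_numbers = True
--
--                 if is_only_numbers and len(non_empty_lines) > 2:
--                     # 这是一个只有行号的空代码块，删除整个代码块
--                     # 回退到代码块开始之前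
--                     result = result[:code_start_idx]
--                 else:
--                     # 保留代码块
--                     result.extend(code_block_lines)
--                     result.append(line)
--
--                 in_code_block = False
--                 code_block_lines = []
--         else:
--             if in_code_block:
--                 # 在代码块内，收集行
--                 code_block_lines.append(line)
--             else:
--                 # 在代码块外，直接添加
--                 result.append(line)
--
--     return '\n'.join(result)
-- ===== SOURCE B (Python) =====
-- def remove_empty_code_blocks(content):
--     """删除只有行号或完全为空的代码块"""
--     lines = content.split('\n')
--     out = []
--     i, n = 0, len(lines)
--     while i < n:
--         line = lines[i]
--         if not line.strip().startswith('```'):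
--             out.append(line)
--             i += 1
--             continue
--         # opening fence: scan ahead for the closing fence
--         j = i + 1
--         while j < n and not lines[j].strip().startswith('```'):
--             j += 1
--         if j == n:
--             # unclosed trailing fence: the fence line is kept, its content dropped
--             out.append(line)
--             break
--         interior = lines[i + 1:j]
--         non_empty = [l for l in interior if l.strip()]
--         if not (len(non_empty) > 2 and all(l.strip().isdigit() for l in non_empty)):
--             out.append(line)
--             out.extend(interior)
--             out.append(lines[j])
--         i = j + 1
--     return '\n'.join(out)
-- ===== Notes on version B (the rewrite author's own statement) =====
-- stated objective: alternative
-- what changed: Replaces A's single-pass state machine (in_code_block flag, buffered block lines, and truncating the accumulated result to backtrack over a dropped block) with a look-ahead scanner that finds each closing fence first, slices the interior, and decides keep/drop before emitting anything.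
import Mathlib
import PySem

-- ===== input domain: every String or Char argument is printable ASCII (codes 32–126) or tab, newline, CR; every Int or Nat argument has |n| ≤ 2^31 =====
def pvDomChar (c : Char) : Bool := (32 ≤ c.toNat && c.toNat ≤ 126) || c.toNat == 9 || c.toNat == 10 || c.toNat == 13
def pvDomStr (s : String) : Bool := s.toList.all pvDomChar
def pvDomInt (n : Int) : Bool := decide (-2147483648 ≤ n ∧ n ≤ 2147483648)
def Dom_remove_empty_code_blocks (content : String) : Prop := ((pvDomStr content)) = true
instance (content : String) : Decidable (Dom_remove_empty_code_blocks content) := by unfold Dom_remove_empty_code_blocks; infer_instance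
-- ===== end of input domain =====

-- B replaces A's in_code_block state machine (with result truncation) by a look-ahead
-- scanner that finds each closing fence first and decides keep/drop before emitting.

-- ===== PORT A =====
-- A's loop state: (result, in_code_block, code_start_idx, code_lang, code_block_lines)
def aStep (st : List String × Bool × Int × String × List String) (line : String) :
    List String × Bool × Int × String × List String :=
  let (result, inb, idx, lang, bl) := st
  if PySem.Str.startswith (PySem.Str.strip line) "```" then
    if !inb then
      (result ++ [line], true, (result.length : Int),
       PySem.Str.strip (PySem.Str.slice (PySem.Str.strip line) (some 3) none), [])
    else
      let nonEmpty := bl.filter (fun l => PySem.Str.strip l != "")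
      -- Python's break-loop over non_empty computes exactly "all are digit strings"
      let isOnlyNumbers := nonEmpty.all (fun l => PySem.Str.strIsdigit (PySem.Str.strip l))
      if isOnlyNumbers && decide (nonEmpty.length > 2) then
        (PySem.List.slice result none (some idx), false, idx, lang, [])
      else
        (result ++ bl ++ [line], false, idx, lang, [])
  else
    if inb then (result, true, idx, lang, bl ++ [line])
    else (result ++ [line], false, idx, lang, bl)

def remove_empty_code_blocks (content : String) : String :=
  let lines := (PySem.Str.split? content "\n").getD []
  let st := lines.foldl aStep ([], false, (-1 : Int), "", [])
  PySem.Str.join "\n" st.1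

-- ===== PORT B =====
def bGo : List String → List String
  | [] => []
  | line :: rest =>
    if PySem.Str.startswith (PySem.Str.strip line) "```" then
      match h : rest.dropWhile (fun l => !(PySem.Str.startswith (PySem.Str.strip l) "```")) with
      | [] => [line]   -- unclosed trailing fence: keep the fence line, drop its content
      | close :: rest2 =>
        let interior := rest.takeWhile (fun l => !(PySem.Str.startswith (PySem.Str.strip l) "```"))
        let nonEmpty := interior.filter (fun l => PySem.Str.strip l != "")
        (if !(decide (nonEmpty.length > 2) &&
              nonEmpty.all (fun l => PySem.Str.strIsdigit (PySem.Str.strip l)))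
          then line :: (interior ++ [close])
          else []) ++ bGo rest2
    else line :: bGo rest
termination_by ls => ls.length
decreasing_by
  · have hle : rest2.length + 1 ≤ rest.length := by
      have hs := (List.dropWhile_sublist
        (p := fun l => !(PySem.Str.startswith (PySem.Str.strip l) "```")) (l := rest)).length_le
      rw [h] at hs; simpa using hs
    simp; omega
  · simp

def remove_empty_code_blocks_alt (content : String) : String :=
  PySem.Str.join "\n" (bGo ((PySem.Str.split? content "\n").getD []))

-- ===== PRECONDITION & SPEC =====
def Spec_remove_empty_code_blocks (content : String) (out : String) : Prop := out = remove_empty_code_blocks_alt content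
instance (content : String) (out : String) : Decidable (Spec_remove_empty_code_blocks content out) := by unfold Spec_remove_empty_code_blocks; infer_instance

-- ===== CLAIM (what is proved, stated in full; the proofs are below) =====
def Claim_equal_remove_empty_code_blocks : Prop := ∀ (content : String), Dom_remove_empty_code_blocks content → Spec_remove_empty_code_blocks content (remove_empty_code_blocks content)

-- ===== LEMMAS AND PROOFS =====

-- the fence test both programs use
def fen (l : String) : Bool := PySem.Str.startswith (PySem.Str.strip l) "```"

-- inside a code block, A's fold runs to the first fence of ls (collecting lines),
-- closes the block there, and continues in the "outside" state
theorem aStep_in (ls : List String) (r0 : List String) (fl lang : String) (bl : List String) :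
    List.foldl aStep (r0 ++ [fl], true, (r0.length : Int), lang, bl) ls =
      match ls.dropWhile (fun l => !fen l) with
      | [] => (r0 ++ [fl], true, (r0.length : Int), lang, bl ++ ls)
      | c :: rest =>
        let nonEmpty := (bl ++ ls.takeWhile (fun l => !fen l)).filter (fun l => PySem.Str.strip l != "")
        List.foldl aStep
          ((if nonEmpty.all (fun l => PySem.Str.strIsdigit (PySem.Str.strip l)) && decide (nonEmpty.length > 2)
            then r0 else (r0 ++ [fl]) ++ (bl ++ ls.takeWhile (fun l => !fen l)) ++ [c]),
           false, (r0.length : Int), lang, []) rest := by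
  induction ls generalizing bl with
  | nil => simp
  | cons l ls ih =>
    by_cases hf : fen l
    · have hf' : PySem.Str.startswith (PySem.Str.strip l) "```" = true := hf
      have hp : (!fen l) = false := by simp [hf]
      simp only [List.foldl_cons, List.dropWhile_cons, List.takeWhile_cons, hp,
        Bool.false_eq_true, if_false, List.append_nil]
      simp only [aStep, hf', if_true, Bool.not_true, Bool.false_eq_true, if_false]
      rw [PySem.List.slice_to_natCast, List.take_left]
      split_ifs <;> rfl
    · have hf' : PySem.Str.startswith (PySem.Str.strip l) "```" = false := by
        simpa [fen] using hf
      have hp : (!fen l) = true := by unfold fen; rw [hf']; rfl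
      simp only [List.foldl_cons, List.dropWhile_cons, List.takeWhile_cons, hp, if_true]
      simp only [aStep, hf', Bool.false_eq_true, if_false, if_true]
      rw [ih (bl ++ [l])]
      cases hdw : ls.dropWhile (fun l => !fen l) with
      | nil => simp
      | cons c rest => simp

-- outside a code block, A's fold appends exactly what B's scanner produces
theorem aStep_out (n : Nat) (ls : List String) (hn : ls.length ≤ n)
    (r : List String) (idx : Int) (lang : String) :
    (List.foldl aStep (r, false, idx, lang, []) ls).1 = r ++ bGo ls := by
  induction n generalizing ls r idx lang with
  | zero =>
    have : ls = [] := List.length_eq_zero_iff.mp (Nat.le_zero.mp hn)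
    subst this; simp [bGo]
  | succ n ih =>
    cases ls with
    | nil => simp [bGo]
    | cons l ls =>
      by_cases hf : fen l
      · have hf' : PySem.Str.startswith (PySem.Str.strip l) "```" = true := hf
        simp only [List.foldl_cons]
        simp only [aStep, hf', if_true, Bool.not_false, Bool.false_eq_true, if_false]
        rw [aStep_in ls r l _ []]
        cases hdw : ls.dropWhile (fun l => !fen l) with
        | nil =>
          have hbGo : bGo (l :: ls) = [l] := by
            rw [bGo]
            simp only [hf', if_true]
            have : ls.dropWhile (fun l => !(PySem.Str.startswith (PySem.Str.strip l) "```")) = [] := hdw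
            rw [this]
          rw [hbGo]
        | cons c rest =>
          have hrest : rest.length ≤ n := by
            have hs := (List.dropWhile_sublist (p := fun l => !fen l) (l := ls)).length_le
            rw [hdw] at hs
            simp only [List.length_cons] at hs hn
            omega
          have hbGo : bGo (l :: ls) =
              (if !(decide (((ls.takeWhile (fun l => !fen l)).filter
                      (fun l => PySem.Str.strip l != "")).length > 2) &&
                    ((ls.takeWhile (fun l => !fen l)).filter (fun l => PySem.Str.strip l != "")).all
                      (fun l => PySem.Str.strIsdigit (PySem.Str.strip l)))
                then l :: (ls.takeWhile (fun l => !fen l) ++ [c]) else []) ++ bGo rest := by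
            rw [bGo]
            simp only [hf', if_true]
            have : ls.dropWhile (fun l => !(PySem.Str.startswith (PySem.Str.strip l) "```")) = c :: rest := hdw
            rw [this]
            rfl
          rw [hbGo, ih rest hrest]
          simp only [List.nil_append]
          split_ifs with hA hB hB
          · simp only [Bool.and_eq_true, decide_eq_true_eq] at hA
            simp only [hA.1, Bool.and_true, Bool.not_eq_true', decide_eq_false_iff_not] at hB
            omega
          · rfl
          · simp [List.append_assoc]
          · exfalso
            rw [Bool.not_eq_true] at hA hB
            rw [Bool.not_eq_false'] at hB
            rw [Bool.and_eq_true] at hB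
            rw [Bool.and_eq_false_iff] at hA
            simp only [decide_eq_true_eq] at hB
            simp only [decide_eq_false_iff_not] at hA
            rcases hA with h | h
            · rw [h] at hB
              exact absurd hB.2 (by simp)
            · exact h hB.1
      · have hf' : PySem.Str.startswith (PySem.Str.strip l) "```" = false := by
          simpa [fen] using hf
        simp only [List.foldl_cons]
        simp only [aStep, hf', Bool.false_eq_true, if_false]
        rw [ih ls (by simpa using Nat.le_of_succ_le_succ (by simpa using hn))]
        rw [bGo]
        simp only [hf', Bool.false_eq_true, if_false]
        simp

-- ===== VERDICT (by name: the statement is the Claim_ definition above) =====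
theorem remove_empty_code_blocks_spec : Claim_equal_remove_empty_code_blocks := by
  intro content _
  unfold Spec_remove_empty_code_blocks remove_empty_code_blocks remove_empty_code_blocks_alt
  have h := aStep_out ((PySem.Str.split? content "\n").getD []).length ((PySem.Str.split? content "\n").getD [])
    le_rfl [] (-1) ""
  simp at h ⊢
  rw [h]
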